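-- pv_equiv track=rewrite | github.com/shonyeajin/PhaseBind | model_v4.py | _parse_label_line
-- ===== SOURCE A (Python) =====
-- from typing import Dict, List, Tuple, Optional
--
-- def _parse_label_line(line: str)-> Optional[List[int]]:
--     line = line.strip()
--     if not line:
--         return None
--     if set(line) <= set("01") and len(line) >1:
--         return [int(c) for c in line]
--     else:
--         return None
-- ===== SOURCE B (Python) =====
-- from typing import List, Optional
--
-- def _parse_label_line(line: str) -> Optional[List[int]]:
--     stripped = line.strip()
--     if not stripped:
--         return None
--     result = []
--     for c in stripped:
--         if c == '0':
--             result.append(0)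
--         elif c == '1':
--             result.append(1)
--         else:
--             return None
--     if len(result) <= 1:
--         return None
--     return result
-- ===== Notes on version B (the rewrite author's own statement) =====
-- stated objective: alternative
-- what changed: B fuses A's set-building subset test and separate int-conversion comprehension into a single character loop with early exit on the first invalid character, checking the length guard afterwards.
import Mathlib
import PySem

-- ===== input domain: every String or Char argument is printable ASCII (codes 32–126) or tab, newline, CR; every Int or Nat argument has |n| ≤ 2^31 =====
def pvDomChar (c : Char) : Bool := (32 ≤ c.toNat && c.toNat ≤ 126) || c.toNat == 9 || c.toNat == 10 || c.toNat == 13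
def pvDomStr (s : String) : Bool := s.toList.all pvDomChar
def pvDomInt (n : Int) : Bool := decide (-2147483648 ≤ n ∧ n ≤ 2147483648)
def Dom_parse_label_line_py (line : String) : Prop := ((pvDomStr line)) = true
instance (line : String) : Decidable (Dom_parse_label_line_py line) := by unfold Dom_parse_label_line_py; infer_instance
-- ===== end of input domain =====

-- B fuses A's set-based subset test and separate conversion comprehension into one character loop with early exit; same O(n) cost, different decomposition.

-- ===== PORT A =====
def parse_label_line_py (line : String) : Option (List Int) :=
  let line := PySem.Str.strip line
  if line = "" then none
  else if PySem.Set.issubset (PySem.Set.ofList line.toList) (PySem.Set.ofList "01".toList)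
          && decide (1 < PySem.Str.len line) then
    -- [int(c) for c in line]: int(c) ported exactly as PySem.Int.ofChars? [c]; in this branch it is always some
    some (line.toList.map (fun c => (PySem.Int.ofChars? [c]).getD 0))
  else none

-- ===== PORT B =====
def pvAltGo : List Char → List Int → Option (List Int)
  | [], acc => if acc.length ≤ 1 then none else some acc
  | c :: rest, acc =>
    if c = '0' then pvAltGo rest (acc ++ [0])
    else if c = '1' then pvAltGo rest (acc ++ [1])
    else none

def parse_label_line_py_alt (line : String) : Option (List Int) :=
  let stripped := PySem.Str.strip line
  if stripped = "" then none
  else pvAltGo stripped.toList []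

-- ===== PRECONDITION & SPEC =====
def Spec_parse_label_line_py (line : String) (out : Option (List Int)) : Prop := out = parse_label_line_py_alt line
instance (line : String) (out : Option (List Int)) : Decidable (Spec_parse_label_line_py line out) := by unfold Spec_parse_label_line_py; infer_instance

-- ===== CLAIM (what is proved, stated in full; the proofs are below) =====
def Claim_equal_parse_label_line_py : Prop := ∀ (line : String), Dom_parse_label_line_py line → Spec_parse_label_line_py line (parse_label_line_py line)

-- ===== LEMMAS AND PROOFS =====

-- B's loop computes: all chars valid → length guard over acc ++ converted list, else none.
theorem pvAltGo_spec (cs : List Char) (acc : List Int) :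
    pvAltGo cs acc =
      if cs.all (fun c => c = '0' || c = '1') then
        (if acc.length + cs.length <= 1 then none
         else some (acc ++ cs.map (fun c => if c = '1' then (1 : Int) else 0)))
      else none := by
  induction cs generalizing acc with
  | nil => simp [pvAltGo]
  | cons c rest ih =>
    by_cases h0 : c = '0'
    · subst h0
      rw [show pvAltGo ('0' :: rest) acc = pvAltGo rest (acc ++ [0]) from by
        simp [pvAltGo], ih]
      by_cases hr : (rest.all fun c => decide (c = '0') || decide (c = '1')) = true
      · simp only [List.all_cons, hr, Bool.and_true, List.map_cons, List.length_append,
          List.length_cons, List.length_nil]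
        rw [if_pos trivial, if_pos (show (decide True || decide (('0':Char) = '1')) = true from rfl),
          if_neg (show ¬('0':Char) = '1' by decide)]
        split_ifs with h1 h2 h2 <;> try (exfalso; omega)
        · rfl
        · rw [List.append_assoc, List.singleton_append]
      · rw [Bool.not_eq_true] at hr
        simp [List.all_cons, hr]
    · by_cases h1 : c = '1'
      · subst h1
        rw [show pvAltGo ('1' :: rest) acc = pvAltGo rest (acc ++ [1]) from by
          simp [pvAltGo], ih]
        by_cases hr : (rest.all fun c => decide (c = '0') || decide (c = '1')) = true
        · simp only [List.all_cons, hr, Bool.and_true, List.map_cons, List.length_append,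
            List.length_cons, List.length_nil]
          rw [if_pos trivial, if_pos (show (decide (('1':Char) = '0') || decide True) = true from rfl),
            if_pos trivial]
          split_ifs with ha hb hb <;> try (exfalso; omega)
          · rfl
          · rw [List.append_assoc, List.singleton_append]
        · rw [Bool.not_eq_true] at hr
          simp [List.all_cons, hr]
      · have hnone : pvAltGo (c :: rest) acc = none := by
          simp [pvAltGo, h0, h1]
        have hall : (c :: rest).all (fun c => c = '0' || c = '1') = false := by
          simp [List.all_cons, h0, h1]
        rw [hnone, hall]
        rfl

-- A's subset test over the char set equals the all-chars-valid test.
theorem pv_subset_eq_all (cs : List Char) :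
    (PySem.Set.issubset (PySem.Set.ofList cs) (PySem.Set.ofList "01".toList))
      = cs.all (fun c => c = '0' || c = '1') := by
  by_cases h : ∀ c ∈ cs, c = '0' ∨ c = '1'
  · have h1 : PySem.Set.issubset (PySem.Set.ofList cs) (PySem.Set.ofList "01".toList) = true := by
      refine (PySem.Set.issubset_iff _ _).mpr ?_
      intro c hc
      rw [PySem.Set.mem_ofList] at hc ⊢
      rcases h c hc with h' | h' <;> simp [h']
    have h2 : cs.all (fun c => c = '0' || c = '1') = true := by
      refine List.all_eq_true.mpr ?_
      intro c hc
      rcases h c hc with h' | h' <;> simp [h']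
    rw [h1, h2]
  · rw [not_forall] at h
    obtain ⟨c, hc⟩ := h
    rw [Classical.not_imp, not_or] at hc
    obtain ⟨hc, h0, h1⟩ := hc
    have hA : PySem.Set.issubset (PySem.Set.ofList cs) (PySem.Set.ofList "01".toList) = false := by
      apply Bool.eq_false_iff.mpr
      intro hsub
      have := (PySem.Set.issubset_iff _ _).mp hsub c ((PySem.Set.mem_ofList _ _).mpr hc)
      rw [PySem.Set.mem_ofList] at this
      rcases (by simpa using this : c = '0' ∨ c = '1') with h' | h'
      · exact h0 h'
      · exact h1 h'
    have hB : cs.all (fun c => c = '0' || c = '1') = false := by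
      apply Bool.eq_false_iff.mpr
      intro hall
      have := List.all_eq_true.mp hall c hc
      simp only [Bool.or_eq_true, decide_eq_true_eq] at this
      rcases this with h' | h'
      · exact h0 h'
      · exact h1 h'
    rw [hA, hB]

-- the core equality, stated on an arbitrary (stripped) string
theorem pv_key (s : String) :
    (if PySem.Set.issubset (PySem.Set.ofList s.toList) (PySem.Set.ofList "01".toList)
          && decide (1 < PySem.Str.len s) then
        some (s.toList.map (fun c => (PySem.Int.ofChars? [c]).getD 0))
      else none)
      = pvAltGo s.toList [] := by
  rw [pvAltGo_spec, pv_subset_eq_all, PySem.Str.len_eq]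
  by_cases hall : (s.toList.all fun c => decide (c = '0') || decide (c = '1')) = true
  · rw [hall, Bool.true_and, if_pos rfl]
    simp only [List.length_nil, List.nil_append, Nat.zero_add]
    by_cases hgt : 1 < s.toList.length
    · rw [if_pos (by simp only [decide_eq_true_eq]; exact_mod_cast hgt), if_neg (by omega)]
      congr 1
      apply List.map_congr_left
      intro c hc
      have := List.all_eq_true.mp hall c hc
      simp only [Bool.or_eq_true, decide_eq_true_eq] at this
      rcases this with h' | h' <;> subst h' <;> rfl
    · rw [if_neg (by simp only [decide_eq_true_eq]; intro h; exact hgt (by exact_mod_cast h)),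
        if_pos (by omega)]
  · rw [Bool.not_eq_true] at hall
    rw [hall, Bool.false_and, if_neg (by simp), if_neg (by simp)]

-- ===== VERDICT (by name: the statement is the Claim_ definition above) =====
theorem parse_label_line_py_spec : Claim_equal_parse_label_line_py := by
  intro line _
  unfold Spec_parse_label_line_py parse_label_line_py parse_label_line_py_alt
  by_cases hempty : PySem.Str.strip line = ""
  · simp [hempty]
  · rw [if_neg hempty, if_neg hempty]
    exact pv_key (PySem.Str.strip line)
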